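-- pv_equiv track=rewrite | github.com/linnil1/taiwan_interchange | backend/utils.py | choose_modal_per_group
-- ===== SOURCE A (Python) =====
-- from collections import Counter
-- from collections.abc import Hashable, Iterable
-- from typing import TypeVar
--
-- T = TypeVar("T", bound=Hashable)
--
-- def choose_modal_per_group(group_to_values: dict[int, list[T]]) -> dict[int, T]:
--     """Return the modal value for each group with deterministic tie-breaking.
--
--     Inputs:
--         group_to_values: mapping from int group key to list of hashable values
--
--     Returns:
--         mapping from group key to its modal value. If multiple values tie for max
--         frequency, the earliest occurrence in that group's input list is chosen.
--     """
--     result: dict[int, T] = {}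
--     for gid, values in group_to_values.items():
--         if not values:
--             continue
--         counts = Counter(values)
--         max_count = max(counts.values())
--         # Deterministic tie-break: earliest in the original list with max frequency
--         for v in values:
--             if counts[v] == max_count:
--                 result[gid] = v
--                 break
--     return result
-- ===== SOURCE B (Python) =====
-- def _better(best, run):
--     """Lexicographically better run: higher count, then smaller first index."""
--     if best is None:
--         return run
--     if run is None:
--         return best
--     if run[0] > best[0] or (run[0] == best[0] and run[1] < best[1]):
--         return run
--     return best
--
--
-- def choose_modal_per_group(group_to_values):
--     """Modal value per group via sort-and-run-scan; ties -> earliest occurrence.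
--
--     Sorting enumerate(values) by (value, index) makes equal values contiguous
--     with ascending original indices, so each run's length is that value's
--     frequency and its first element carries the value's first-occurrence index.
--     """
--     result = {}
--     for gid, values in group_to_values.items():
--         if not values:
--             continue
--         pairs = sorted(enumerate(values), key=lambda p: (p[1], p[0]))
--         best = None  # (count, first_index, value)
--         run = None
--         for idx, v in pairs:
--             if run is not None and run[2] == v:
--                 run = (run[0] + 1, run[1], v)
--             else:
--                 best = _better(best, run)
--                 run = (1, idx, v)
--         best = _better(best, run)
--         result[gid] = best[2]
--     return result
-- ===== Notes on version B (the rewrite author's own statement) =====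
-- stated objective: alternative
-- what changed: Replaces A's Counter + max over counts + second ordered rescan-with-break by a sort-based algorithm: per group it sorts enumerate(values) by (value, index) and scans the runs of equal values once, keeping the running best (count, first_index) run, so no hash counting or rescan is performed; over the int domain values are totally ordered so the sort is well-defined.
import Mathlib
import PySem

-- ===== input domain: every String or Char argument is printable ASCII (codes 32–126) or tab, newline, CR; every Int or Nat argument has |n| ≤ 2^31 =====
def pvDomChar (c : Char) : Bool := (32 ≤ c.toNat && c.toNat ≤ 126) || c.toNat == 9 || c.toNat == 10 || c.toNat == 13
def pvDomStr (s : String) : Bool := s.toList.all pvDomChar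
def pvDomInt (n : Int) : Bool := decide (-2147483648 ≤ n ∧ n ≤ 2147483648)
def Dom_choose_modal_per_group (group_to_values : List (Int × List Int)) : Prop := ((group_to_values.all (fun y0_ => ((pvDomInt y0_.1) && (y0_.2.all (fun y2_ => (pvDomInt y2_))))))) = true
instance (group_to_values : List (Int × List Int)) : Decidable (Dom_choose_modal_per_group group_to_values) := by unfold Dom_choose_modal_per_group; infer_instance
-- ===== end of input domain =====

-- B replaces A's Counter + max over counts + ordered rescan by a sort-based algorithm:
-- sort enumerate(values) by (value, index), scan the runs of equal values once,
-- keep the running best (count, first_index) run (objective: alternative).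

-- ===== PORT A =====
-- per-group body of A's loop: Counter, max of its values, first value in the list with that count
def chooseModalStepA (result : PySem.Dict Int Int) (gv : Int × List Int) : PySem.Dict Int Int :=
  let gid := gv.1
  let values := gv.2
  if values = [] then result           -- if not values: continue
  else
    let counts := PySem.Dict.counter values
    match PySem.List.max? counts.values (fun y => y) with   -- max_count = max(counts.values())
    | none => result                   -- unreachable: counts nonempty (Python would raise ValueError)
    | some max_count =>
      -- for v in values: if counts[v] == max_count: result[gid] = v; break
      match values.find? (fun v => counts.getD v 0 == max_count) with
      | none => result                 -- loop fell through without break (unreachable)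
      | some v => result.insert gid v

def choose_modal_per_group (group_to_values : List (Int × List Int)) : List (Int × Int) :=
  ((PySem.Dict.ofList group_to_values).items.foldl chooseModalStepA PySem.Dict.empty).items

-- ===== PORT B =====
-- _better(best, run): lexicographically better run — higher count, then smaller first index
def pvBetter (best run : Option (Int × Int × Int)) : Option (Int × Int × Int) :=
  match best, run with
  | none, r => r
  | some b, none => some b
  | some b, some r =>
      if r.1 > b.1 ∨ (r.1 = b.1 ∧ r.2.1 < b.2.1) then some r else some b

-- body of B's 'for idx, v in pairs' loop; state = (best, run), triples are (count, first_index, value)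
def pvRunStep (st : Option (Int × Int × Int) × Option (Int × Int × Int)) (p : Int × Int) :
    Option (Int × Int × Int) × Option (Int × Int × Int) :=
  match st.2 with
  | some r =>
      if r.2.2 = p.2 then (st.1, some (r.1 + 1, r.2.1, p.2))   -- run extends
      else (pvBetter st.1 st.2, some (1, p.1, p.2))            -- close run, open new
  | none => (pvBetter st.1 st.2, some (1, p.1, p.2))

-- per-group body of B's loop: sort enumerate(values) by (value, index), scan runs
def chooseModalStepB (result : PySem.Dict Int Int) (gv : Int × List Int) : PySem.Dict Int Int :=
  if gv.2 = [] then result             -- if not values: continue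
  else
    let pairs := PySem.List.sorted2 (PySem.List.enumerate gv.2 0) (fun p => p.2) (fun p => p.1)
    let st := pairs.foldl pvRunStep (none, none)
    match pvBetter st.1 st.2 with      -- best = _better(best, run); result[gid] = best[2]
    | none => result                   -- unreachable: pairs nonempty, best is not None
    | some b => result.insert gv.1 b.2.2

def choose_modal_per_group_alt (group_to_values : List (Int × List Int)) : List (Int × Int) :=
  ((PySem.Dict.ofList group_to_values).items.foldl chooseModalStepB PySem.Dict.empty).items

-- ===== PRECONDITION & SPEC =====
def Spec_choose_modal_per_group (group_to_values : List (Int × List Int)) (out : List (Int × Int)) : Prop := out = choose_modal_per_group_alt group_to_values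
instance (group_to_values : List (Int × List Int)) (out : List (Int × Int)) : Decidable (Spec_choose_modal_per_group group_to_values out) := by unfold Spec_choose_modal_per_group; infer_instance

-- ===== CLAIM (what is proved, stated in full; the proofs are below) =====
def Claim_equal_choose_modal_per_group : Prop := ∀ (group_to_values : List (Int × List Int)), Dom_choose_modal_per_group group_to_values → Spec_choose_modal_per_group group_to_values (choose_modal_per_group group_to_values)

-- ===== LEMMAS AND PROOFS =====

-- the (value, index) lexicographic order B sorts by
abbrev pvLex (a b : Int × Int) : Prop := a.2 < b.2 ∨ (a.2 = b.2 ∧ a.1 < b.1)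

-- "run t strictly better than run b": higher count, or equal count and smaller first index
abbrev pvGtT (t b : Int × Int × Int) : Prop := t.1 > b.1 ∨ (t.1 = b.1 ∧ t.2.1 < b.2.1)

-- the run triple of value v in list l
def pvTriple (l : List Int) (v : Int) : Int × Int × Int := ((l.count v : Int), (l.idxOf v : Int), v)

-- sorted2's comparator is pvLex
lemma sorted2_before_eq (a b : Int × Int) :
    (decide (a.2 < b.2) || !decide (b.2 < a.2) && decide (a.1 < b.1)) = decide (pvLex a b) := by
  unfold pvLex
  by_cases h1 : a.2 < b.2 <;> by_cases h2 : b.2 < a.2 <;> by_cases h3 : a.1 < b.1 <;>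
    simp [h1, h2, h3] <;> omega

-- insertion keeps the "no later element strictly lex-smaller" invariant
lemma insertBy_pairwise (x : Int × Int) (acc : List (Int × Int))
    (h : acc.Pairwise (fun a b => ¬ pvLex b a)) :
    (PySem.List.insertBy (fun a b => decide (pvLex a b)) x acc).Pairwise (fun a b => ¬ pvLex b a) := by
  induction acc with
  | nil => simp [PySem.List.insertBy]
  | cons y ys ih =>
    rw [List.pairwise_cons] at h
    obtain ⟨hy, hys⟩ := h
    show (PySem.List.insertBy _ x (y :: ys)).Pairwise _
    unfold PySem.List.insertBy
    by_cases hxy : pvLex x y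
    · rw [if_pos (by simpa using hxy)]
      refine List.Pairwise.cons ?_ (List.Pairwise.cons hy hys)
      intro z hz
      rcases List.mem_cons.mp hz with rfl | hz'
      · unfold pvLex at *; omega
      · have := hy z hz'
        unfold pvLex at *; omega
    · rw [if_neg (by simpa using hxy)]
      refine List.Pairwise.cons ?_ (ih hys)
      intro z hz
      rcases (PySem.List.mem_insertBy _ x z ys).mp hz with rfl | hz'
      · exact hxy
      · exact hy z hz'

-- sorted2 output is pairwise "not lex-greater-first"
lemma sorted2_pairwise (xs : List (Int × Int)) :
    (PySem.List.sorted2 xs (fun p => p.2) (fun p => p.1)).Pairwise (fun a b => ¬ pvLex b a) := by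
  unfold PySem.List.sorted2
  simp only
  have hbef : (fun (a b : Int × Int) => decide (a.2 < b.2) || !decide (b.2 < a.2) && decide (a.1 < b.1))
       = fun a b => decide (pvLex a b) := by
    funext a b; exact sorted2_before_eq a b
  rw [hbef]
  generalize hacc : ([] : List (Int × Int)) = acc
  have hp : acc.Pairwise (fun a b => ¬ pvLex b a) := by rw [← hacc]; simp
  clear hacc
  induction xs generalizing acc with
  | nil => simpa using hp
  | cons x t ih => exact ih _ (insertBy_pairwise x acc hp)

-- uniqueness: any perm of xs that is pairwise pvLex IS sorted2 of xs (distinct first components)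
lemma sorted2_lex_eq (xs ys : List (Int × Int))
    (hperm : ys.Perm xs) (hnd : xs.Pairwise (fun a b => a.1 ≠ b.1))
    (hys : ys.Pairwise pvLex) :
    PySem.List.sorted2 xs (fun p => p.2) (fun p => p.1) = ys := by
  have hsp : (PySem.List.sorted2 xs (fun p => p.2) (fun p => p.1)).Perm xs :=
    PySem.List.sorted2_perm xs _ _ false
  have hnd' : (PySem.List.sorted2 xs (fun p => p.2) (fun p => p.1)).Pairwise (fun a b => a.1 ≠ b.1) :=
    (hsp.pairwise_iff (fun h => Ne.symm h)).mpr hnd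
  have hsl : (PySem.List.sorted2 xs (fun p => p.2) (fun p => p.1)).Pairwise pvLex := by
    have := (sorted2_pairwise xs).and hnd'
    exact this.imp (fun {a b} ⟨h1, h2⟩ => by unfold pvLex at *; omega)
  refine List.Perm.eq_of_pairwise ?_ hsl hys (hsp.trans hperm.symm)
  intro a b _ _ hab hba
  exfalso; unfold pvLex at hab hba; omega

-- bucket of value v among the enumerated pairs
def pvBucket (l : List Int) (v : Int) : List (Int × Int) :=
  (PySem.List.enumerate l 0).filter (fun p => p.2 == v)

-- canonical sorted form: buckets in increasing value order
def pvCanon (l : List Int) : List (Int × Int) :=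
  (PySem.List.sorted (PySem.Set.ofList l) (fun x => x)).flatMap (pvBucket l)

lemma partition_perm (D : List Int) : ∀ (t : List (Int × Int)),
    D.Nodup → (∀ p ∈ t, p.2 ∈ D) →
    (D.flatMap (fun v => t.filter (fun p => p.2 == v))).Perm t := by
  induction D with
  | nil =>
    intro t _ hall
    cases t with
    | nil => simp
    | cons p t' => exact absurd (hall p (by simp)) (by simp)
  | cons v D' ih =>
    intro t hnd hall
    rw [List.flatMap_cons]
    have hvD : v ∉ D' := (List.nodup_cons.mp hnd).1
    have hfe : ∀ w ∈ D', (t.filter (fun p => !(p.2 == v))).filter (fun p => p.2 == w)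
        = t.filter (fun p => p.2 == w) := by
      intro w hw
      rw [List.filter_filter]
      apply List.filter_congr
      intro p _
      by_cases hpw : p.2 = w
      · simp [hpw]
        exact fun h => hvD (h ▸ hw)
      · simp [hpw]
    have hrw : D'.flatMap (fun w => t.filter (fun p => p.2 == w))
        = D'.flatMap (fun w => (t.filter (fun p => !(p.2 == v))).filter (fun p => p.2 == w)) := by
      apply List.flatMap_congr
      intro w hw
      exact (hfe w hw).symm
    rw [hrw]
    have hperm' := ih (t.filter (fun p => !(p.2 == v))) (List.nodup_cons.mp hnd).2 ?side
    case side =>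
      intro p hp
      rw [List.mem_filter] at hp
      have := hall p hp.1
      rcases List.mem_cons.mp this with h | h
      · exfalso; simp [h] at hp
      · exact h
    exact (hperm'.append_left _).trans (List.filter_append_perm _ t)

lemma canon_perm (l : List Int) : (pvCanon l).Perm (PySem.List.enumerate l 0) := by
  apply partition_perm
  · exact (PySem.List.sorted_ofList_pairwise_lt l).imp (fun {a b} h => ne_of_lt h)
  · intro p hp
    rw [PySem.List.mem_sorted, PySem.Set.mem_ofList]
    rcases (PySem.List.mem_enumerate_iff _ _ _).mp hp with ⟨k, hk, rfl⟩
    exact List.getElem_mem hk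

lemma canon_pairwise (l : List Int) : (pvCanon l).Pairwise pvLex := by
  unfold pvCanon
  have hD := PySem.List.sorted_ofList_pairwise_lt l
  generalize (PySem.List.sorted (PySem.Set.ofList l) (fun x => x)) = D at hD ⊢
  induction D with
  | nil => simp
  | cons v D' ih =>
    rw [List.pairwise_cons] at hD
    rw [List.flatMap_cons, List.pairwise_append]
    have hbsnd : ∀ w, ∀ p ∈ pvBucket l w, p.2 = w := by
      intro w p hp
      have := (List.mem_filter.mp hp).2
      simpa using this
    refine ⟨?_, ih hD.2, ?_⟩
    · have hfst : (pvBucket l v).Pairwise (fun p q => p.1 < q.1) :=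
        (PySem.List.pairwise_lt_enumerate l 0).filter _
      refine hfst.imp_of_mem (fun {a b} ha hb h => ?_)
      right
      exact ⟨(hbsnd v a ha).trans (hbsnd v b hb).symm, h⟩
    · intro a ha b hb
      rcases List.mem_flatMap.mp hb with ⟨w, hw, hbw⟩
      left
      rw [hbsnd v a ha, hbsnd w b hbw]
      exact hD.1 w hw

lemma sorted2_eq_canon (l : List Int) :
    PySem.List.sorted2 (PySem.List.enumerate l 0) (fun p => p.2) (fun p => p.1) = pvCanon l := by
  apply sorted2_lex_eq
  · exact canon_perm l
  · exact (PySem.List.pairwise_lt_enumerate l 0).imp (fun {a b} h => ne_of_lt h)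
  · exact canon_pairwise l

-- find? over enumerate locates the first occurrence
lemma find?_enumerate (l : List Int) : ∀ (s : Int) (v : Int), v ∈ l →
    (PySem.List.enumerate l s).find? (fun p => p.2 == v) = some (s + (l.idxOf v : Int), v) := by
  induction l with
  | nil => intro s v hv; simp at hv
  | cons x xs ih =>
    intro s v hv
    rw [PySem.List.enumerate_cons, List.find?_cons]
    by_cases hxv : x = v
    · simp only [hxv, beq_self_eq_true]
      simp
    · have hvxs : v ∈ xs := by rcases List.mem_cons.mp hv with h | h; exact absurd h.symm hxv; exact h
      have hb : ((s, x).2 == v) = false := by simp [hxv]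
      rw [hb]
      rw [ih (s+1) v hvxs]
      simp only [List.idxOf_cons]
      have hbf : (x == v) = false := by simp [hxv]
      rw [hbf]
      simp only [cond_false]
      push_cast
      ring_nf

-- bucket facts
lemma bucket_head? (l : List Int) (v : Int) (hv : v ∈ l) :
    (pvBucket l v).head? = some ((l.idxOf v : Int), v) := by
  unfold pvBucket
  rw [List.head?_filter, find?_enumerate l 0 v hv]
  norm_num

lemma bucket_ne_nil (l : List Int) (v : Int) (hv : v ∈ l) : pvBucket l v ≠ [] := by
  intro h
  have := bucket_head? l v hv
  rw [h] at this
  simp at this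

lemma bucket_length (l : List Int) (v : Int) : (pvBucket l v).length = l.count v := by
  unfold pvBucket
  rw [← List.countP_eq_length_filter]
  have hc : l.count v = List.countP (fun x => x == v) l := by rw [List.count]
  rw [hc]
  have hmap := PySem.List.map_snd_enumerate l (0 : Int)
  calc List.countP (fun p => p.2 == v) (PySem.List.enumerate l 0)
      = List.countP (fun x => x == v) ((PySem.List.enumerate l 0).map (·.2)) := by
        rw [List.countP_map]; rfl
    _ = List.countP (fun x => x == v) l := by rw [hmap]

lemma bucket_snd (l : List Int) (v : Int) : ∀ p ∈ pvBucket l v, p.2 = v := by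
  intro p hp
  have := (List.mem_filter.mp hp).2
  simpa using this

-- scanning a run of equal values just counts it
lemma pvBetter_none (b : Option (Int × Int × Int)) : pvBetter b none = b := by
  cases b <;> rfl

lemma fold_run_extend (v : Int) (t : List (Int × Int)) :
    ∀ (r : Int × Int × Int) (best : Option (Int × Int × Int)),
    (∀ p ∈ t, p.2 = v) → r.2.2 = v →
    t.foldl pvRunStep (best, some r) = (best, some (r.1 + t.length, r.2.1, v)) := by
  induction t with
  | nil =>
    intro r best _ hr
    simp only [List.foldl_nil, List.length_nil]
    rw [show r.1 + ((0 : Nat) : Int) = r.1 by simp]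
    rw [← hr]
  | cons p t' ih =>
    intro r best hall hr
    have hp : p.2 = v := hall p (by simp)
    simp only [List.foldl_cons]
    have hstep : pvRunStep (best, some r) p = (best, some (r.1 + 1, r.2.1, p.2)) := by
      unfold pvRunStep
      simp only
      rw [if_pos (hr.trans hp.symm)]
    rw [hstep, hp, ih (r.1 + 1, r.2.1, v) best (fun q hq => hall q (by simp [hq])) rfl]
    simp only [List.length_cons]
    congr 2
    push_cast
    ring_nf

lemma fold_bucket (l : List Int) (v : Int) (hv : v ∈ l) (best : Option (Int × Int × Int)) :
    (pvBucket l v).foldl pvRunStep (best, none) = (best, some (pvTriple l v)) := by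
  cases hb : pvBucket l v with
  | nil => exact absurd hb (bucket_ne_nil l v hv)
  | cons p0 rest =>
    have hhd := bucket_head? l v hv
    rw [hb] at hhd
    simp only [List.head?_cons, Option.some.injEq] at hhd
    have hall : ∀ p ∈ pvBucket l v, p.2 = v := bucket_snd l v
    rw [hb] at hall
    simp only [List.foldl_cons]
    have hstep : pvRunStep (best, none) p0 = (best, some (1, p0.1, p0.2)) := by
      unfold pvRunStep
      simp only [pvBetter_none]
    rw [hstep, hall p0 (by simp)]
    rw [fold_run_extend v rest (1, p0.1, v) best (fun q hq => hall q (by simp [hq])) rfl]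
    have hlen : ((1 : Int) + (rest.length : Int)) = ((l.count v : Nat) : Int) := by
      have := bucket_length l v
      rw [hb] at this
      simp only [List.length_cons] at this
      omega
    have hidx : p0.1 = ((l.idxOf v : Nat) : Int) := by rw [hhd]
    rw [hlen, hidx]
    rfl

-- the final answer of B's scan over the canonical list is a pvBetter-fold over the triples
lemma fold_canon (l : List Int) :
    ∀ (D : List Int) (best : Option (Int × Int × Int)),
    D.Pairwise (· < ·) → (∀ v ∈ D, v ∈ l) →
    (let st := (D.flatMap (pvBucket l)).foldl pvRunStep (best, none);
     pvBetter st.1 st.2) = D.foldl (fun acc v => pvBetter acc (some (pvTriple l v))) best := by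
  intro D
  induction D with
  | nil =>
    intro best _ _
    simp [pvBetter_none]
  | cons v D' ih =>
    intro best hpw hmem
    have hv : v ∈ l := hmem v (by simp)
    simp only [List.flatMap_cons, List.foldl_append, List.foldl_cons]
    rw [fold_bucket l v hv best]
    cases hD' : D' with
    | nil =>
      simp only [List.flatMap_nil, List.foldl_nil]
    | cons w D'' =>
      have hw : w ∈ l := hmem w (by simp [hD'])
      -- the next bucket is nonempty; closing the pending run equals restarting from (pvBetter best run, none)
      cases hbw : pvBucket l w with
      | nil => exact absurd hbw (bucket_ne_nil l w hw)
      | cons q qs =>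
        have hq2 : q.2 = w := bucket_snd l w q (by rw [hbw]; simp)
        have hvw : v ≠ w := by
          rw [List.pairwise_cons] at hpw
          exact ne_of_lt (hpw.1 w (by simp [hD']))
        have hih := ih (pvBetter best (some (pvTriple l v))) ?pw ?mem
        case pw => rw [List.pairwise_cons] at hpw; exact hpw.2
        case mem => intro u hu; exact hmem u (by simp [hu])
        rw [hD'] at hih
        simp only [List.flatMap_cons, List.foldl_append, hbw, List.foldl_cons] at hih ⊢
        have h1 : pvRunStep (best, some (pvTriple l v)) q
            = (pvBetter best (some (pvTriple l v)), some (1, q.1, q.2)) := by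
          unfold pvRunStep
          simp only
          rw [if_neg]
          show ¬ (pvTriple l v).2.2 = q.2
          rw [hq2]
          exact hvw
        have h2 : pvRunStep (pvBetter best (some (pvTriple l v)), none) q
            = (pvBetter best (some (pvTriple l v)), some (1, q.1, q.2)) := by
          unfold pvRunStep
          simp only [pvBetter_none]
        rw [h1] at *
        rw [h2] at hih
        exact hih

-- the pvBetter fold returns a maximal triple
lemma pvBetter_some_some (c t : Int × Int × Int) :
    pvBetter (some c) (some t) = if pvGtT t c then some t else some c := by
  unfold pvBetter pvGtT
  rfl

lemma fold_better_spec (l : List Int) (ds : List Int) :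
    ∀ (c : Int × Int × Int),
    ∃ r', ds.foldl (fun acc v => pvBetter acc (some (pvTriple l v))) (some c) = some r' ∧
      (r' = c ∨ ∃ v ∈ ds, r' = pvTriple l v) ∧ ¬ pvGtT c r' ∧ ∀ v ∈ ds, ¬ pvGtT (pvTriple l v) r' := by
  induction ds with
  | nil =>
    intro c
    refine ⟨c, by simp, Or.inl rfl, ?_, by simp⟩
    unfold pvGtT; omega
  | cons v ds' ih =>
    intro c
    simp only [List.foldl_cons, pvBetter_some_some]
    by_cases hg : pvGtT (pvTriple l v) c
    · rw [if_pos hg]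
      obtain ⟨r', hfold, hmem, hc', hall⟩ := ih (pvTriple l v)
      refine ⟨r', hfold, ?_, ?_, ?_⟩
      · rcases hmem with h | ⟨w, hw, hr⟩
        · exact Or.inr ⟨v, by simp, h⟩
        · exact Or.inr ⟨w, by simp [hw], hr⟩
      · intro hcc
        apply hc'
        unfold pvGtT at *; omega
      · intro w hw
        rcases List.mem_cons.mp hw with rfl | hw'
        · exact hc'
        · exact hall w hw'
    · rw [if_neg hg]
      obtain ⟨r', hfold, hmem, hc', hall⟩ := ih c
      refine ⟨r', hfold, ?_, hc', ?_⟩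
      · rcases hmem with h | ⟨w, hw, hr⟩
        · exact Or.inl h
        · exact Or.inr ⟨w, by simp [hw], hr⟩
      · intro w hw
        rcases List.mem_cons.mp hw with rfl | hw'
        · intro hvr'
          apply hc'
          unfold pvGtT at *; omega
        · exact hall w hw'

-- the two per-group bodies agree
lemma step_eq (r : PySem.Dict Int Int) (gv : Int × List Int) :
    chooseModalStepA r gv = chooseModalStepB r gv := by
  obtain ⟨gid, l⟩ := gv
  by_cases hl : l = []
  · unfold chooseModalStepA chooseModalStepB
    simp [hl]
  · unfold chooseModalStepA chooseModalStepB
    simp only [hl, reduceIte]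
    -- A's data
    have hvals : (PySem.Dict.counter l).values
        = (PySem.Set.ofList l).map (fun v => ((l.count v : Int))) := by
      show ((PySem.Dict.counter l).items).map (fun p => p.2) = _
      rw [PySem.Dict.items_counter l, List.map_map]
      rfl
    have hofl : PySem.Set.ofList l ≠ [] := by
      intro hnil
      rcases List.exists_mem_of_ne_nil l hl with ⟨x, hx⟩
      have : x ∈ PySem.Set.ofList l := (PySem.Set.mem_ofList l x).mpr hx
      rw [hnil] at this
      simp at this
    cases hmax : PySem.List.max? ((PySem.Dict.counter l).values) (fun y => y) with
    | none =>
      exfalso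
      have := (PySem.List.max?_eq_none_iff _ _).mp hmax
      rw [hvals] at this
      exact hofl (by simpa using this)
    | some M =>
      -- every count is bounded by M, and M is attained
      have hbound : ∀ v ∈ l, ((l.count v : Int)) ≤ M := by
        intro v hv
        have hvmem : ((l.count v : Int)) ∈ (PySem.Dict.counter l).values := by
          rw [hvals]
          exact List.mem_map_of_mem ((PySem.Set.mem_ofList l v).mpr hv)
        exact PySem.List.max?_isMax hmax _ hvmem
      have hattain : ∃ v0 ∈ l, ((l.count v0 : Int)) = M := by
        have hMmem : M ∈ (PySem.Dict.counter l).values := PySem.List.max?_mem hmax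
        rw [hvals] at hMmem
        rcases List.mem_map.mp hMmem with ⟨v0, hv0, hc0⟩
        exact ⟨v0, (PySem.Set.mem_ofList l v0).mp hv0, hc0⟩
      -- A's find? with the counter lookup unfolded to count
      have hpred : (fun v => (PySem.Dict.counter l).getD v 0 == M) = fun v => ((l.count v : Int) == M) := by
        funext v
        rw [PySem.Dict.getD_counter l v]
      dsimp only
      rw [hpred]
      have hfindSome : (l.find? (fun v => ((l.count v : Int) == M))).isSome := by
        rw [List.find?_isSome]
        rcases hattain with ⟨v0, hv0, hc0⟩
        exact ⟨v0, hv0, by simp [hc0]⟩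
      cases hfind : l.find? (fun v => ((l.count v : Int) == M)) with
      | none => rw [hfind] at hfindSome; simp at hfindSome
      | some vA =>
        -- facts about vA
        have hvAmem : vA ∈ l := List.mem_of_find?_eq_some hfind
        have hvAcount : ((l.count vA : Int)) = M := by
          have := List.find?_some hfind
          simpa using this
        have hvAmin : ∀ w ∈ l, ((l.count w : Int)) = M → w ≠ vA → l.idxOf vA < l.idxOf w := by
          intro w hw hcw hne
          rcases List.find?_eq_some_iff_append.mp hfind with ⟨_, as, bs, hsplit, has⟩
          have hvAnotas : vA ∉ as := by
            intro hmem
            have := has vA hmem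
            simp [hvAcount] at this
          have hwnotas : w ∉ as := by
            intro hmem
            have := has w hmem
            simp [hcw] at this
          rw [hsplit, List.idxOf_append_of_notMem hvAnotas, List.idxOf_append_of_notMem hwnotas]
          have h1 : List.idxOf vA (vA :: bs) = 0 := by simp
          have h2 : List.idxOf w (vA :: bs) = List.idxOf w bs + 1 := by
            have : (vA == w) = false := by simp; exact fun h => hne h.symm
            simp [List.idxOf_cons, this]  -- cond on (vA == w) = false
          omega
        -- B's side: sorted2 = canon, scan = pvBetter fold over triples
        rw [sorted2_eq_canon l]
        have hD := PySem.List.sorted_ofList_pairwise_lt l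
        have hDl : ∀ v ∈ PySem.List.sorted (PySem.Set.ofList l) (fun x => x), v ∈ l := by
          intro v hv
          rw [PySem.List.mem_sorted, PySem.Set.mem_ofList] at hv
          exact hv
        have hfc := fold_canon l (PySem.List.sorted (PySem.Set.ofList l) (fun x => x)) none hD hDl
        unfold pvCanon
        simp only at hfc
        rw [hfc]
        have hDne : PySem.List.sorted (PySem.Set.ofList l) (fun x => x) ≠ [] := by
          intro h
          exact hofl ((PySem.List.sorted_eq_nil_iff _ _ _).mp h)
        cases hDc : PySem.List.sorted (PySem.Set.ofList l) (fun x => x) with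
        | nil => exact absurd hDc hDne
        | cons d0 D'' =>
          simp only [List.foldl_cons]
          have hstart : pvBetter none (some (pvTriple l d0)) = some (pvTriple l d0) := rfl
          rw [hstart]
          obtain ⟨r', hfold, hmem, hc', hall⟩ := fold_better_spec l D'' (pvTriple l d0)
          rw [hfold]
          -- the champion r' is pvTriple l u for u ∈ D
          have hmemD : ∀ v, v ∈ (d0 :: D'') → v ∈ l := by
            intro v hv
            apply hDl
            rw [hDc]
            exact hv
          obtain ⟨u, huD, hru⟩ : ∃ u ∈ (d0 :: D''), r' = pvTriple l u := by
            rcases hmem with h | ⟨w, hw, hr⟩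
            · exact ⟨d0, by simp, h⟩
            · exact ⟨w, by simp [hw], hr⟩
          have hul : u ∈ l := hmemD u huD
          -- vA is in D
          have hvAD : vA ∈ (d0 :: D'') := by
            rw [← hDc, PySem.List.mem_sorted, PySem.Set.mem_ofList]
            exact hvAmem
          have hnotgt : ¬ pvGtT (pvTriple l vA) r' := by
            rcases List.mem_cons.mp hvAD with rfl | h
            · exact hc'
            · exact hall vA h
          -- conclude u = vA
          have huvA : u = vA := by
            by_contra hne
            have hcu_le : ((l.count u : Int)) ≤ M := hbound u hul
            rw [hru] at hnotgt
            unfold pvTriple pvGtT at hnotgt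
            simp only at hnotgt
            have hcuM : ((l.count u : Int)) = M := by omega
            have := hvAmin u hul hcuM hne
            omega
          rw [hru, huvA]
          rfl

-- ===== VERDICT (by name: the statement is the Claim_ definition above) =====
theorem choose_modal_per_group_spec : Claim_equal_choose_modal_per_group := by
  intro g _
  show choose_modal_per_group g = choose_modal_per_group_alt g
  unfold choose_modal_per_group choose_modal_per_group_alt
  have hstep : chooseModalStepA = chooseModalStepB :=
    funext fun r => funext fun gv => step_eq r gv
  rw [hstep]
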